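-- pv_equiv track=rewrite | github.com/imrehg/csbloch | simple/threelevel.py | conn
-- ===== SOURCE A (Python) =====
-- def conn(j, k, n):
--     ''' Iterate through the non-diagonal elements '''
--     if (j == k) :
--         return -1
--     if (j > k):
--         j, k = k, j
--     out = -1
--     for temp in range(0, j+1):
--         out += (n - 1) - temp
--     out -= (n - 1) - k
--     return out
-- ===== SOURCE B (Python) =====
-- def conn(j, k, n):
--     ''' Iterate through the non-diagonal elements '''
--     if j == k:
--         return -1
--     lo, hi = (j, k) if j < k else (k, j)
--     c = max(lo + 1, 0)  # number of complete rows above the (lo, hi) element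
--     return c * (n - 1) - c * (c - 1) // 2 + hi - n
-- ===== Notes on version B (the rewrite author's own statement) =====
-- stated objective: faster
-- what changed: Replaces the O(j) loop that accumulates the arithmetic series with a closed-form formula c*(n-1) - c*(c-1)//2 + hi - n, where c counts the loop iterations.
import Mathlib
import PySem

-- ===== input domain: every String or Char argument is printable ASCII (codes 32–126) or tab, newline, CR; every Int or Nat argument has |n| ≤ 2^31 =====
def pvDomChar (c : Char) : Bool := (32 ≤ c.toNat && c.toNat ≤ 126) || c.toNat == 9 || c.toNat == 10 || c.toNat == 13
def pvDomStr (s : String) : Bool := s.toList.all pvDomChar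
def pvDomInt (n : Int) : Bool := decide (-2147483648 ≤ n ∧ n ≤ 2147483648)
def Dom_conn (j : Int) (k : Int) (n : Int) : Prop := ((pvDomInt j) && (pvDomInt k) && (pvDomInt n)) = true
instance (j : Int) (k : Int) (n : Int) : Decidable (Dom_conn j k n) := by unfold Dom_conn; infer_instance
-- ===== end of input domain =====

-- B replaces A's O(min(j,k)) summation loop with a closed-form arithmetic-series formula (O(1)).

-- ===== PORT A =====
def conn (j : Int) (k : Int) (n : Int) : Int :=
  if j = k then -1
  else
    -- if (j > k): j, k = k, j
    let jk := if j > k then (k, j) else (j, k)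
    let j' := jk.1
    let k' := jk.2
    -- out = -1; for temp in range(0, j+1): out += (n - 1) - temp
    let out := (PySem.List.pyRange 0 (j' + 1) 1).foldl (fun out temp => out + ((n - 1) - temp)) (-1)
    -- out -= (n - 1) - k
    out - ((n - 1) - k')

-- ===== PORT B =====
def conn_alt (j : Int) (k : Int) (n : Int) : Int :=
  if j = k then -1
  else
    let lo := if j < k then j else k
    let hi := if j < k then k else j
    let c := max (lo + 1) 0
    c * (n - 1) - PySem.Int.floordiv (c * (c - 1)) 2 + hi - n

-- ===== PRECONDITION & SPEC =====
def Spec_conn (j : Int) (k : Int) (n : Int) (out : Int) : Prop := out = conn_alt j k n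
instance (j : Int) (k : Int) (n : Int) (out : Int) : Decidable (Spec_conn j k n out) := by unfold Spec_conn; infer_instance

-- ===== CLAIM (what is proved, stated in full; the proofs are below) =====
def Claim_equal_conn : Prop := ∀ (j : Int) (k : Int) (n : Int), Dom_conn j k n → Spec_conn j k n (conn j k n)

-- ===== LEMMAS AND PROOFS =====

-- closed form of A's accumulation loop, Nat-indexed
lemma conn_loop_nat (n : Int) : ∀ (m : Nat) (acc : Int),
    ((List.range m).map (fun k : Nat => (0 : Int) + (k : Int))).foldl (fun a t => a + ((n - 1) - t)) acc
      = acc + (m : Int) * (n - 1) - ((m : Int) * ((m : Int) - 1)) / 2 := by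
  intro m
  induction m with
  | zero => intro acc; simp
  | succ m ih =>
    intro acc
    rw [List.range_succ, List.map_append, List.foldl_append, ih]
    simp only [List.map_cons, List.map_nil, List.foldl_cons, List.foldl_nil]
    have hev : ∃ r : Int, ((m : Int) - 1) * m = r + r := (Int.even_mul_succ_self ((m : Int) - 1)).imp (by intro r h; simpa using h)
    obtain ⟨r, hr⟩ := hev
    have h1 : (m : Int) * ((m : Int) - 1) = 2 * r := by rw [mul_comm]; omega
    have h2 : ((m : Nat) + 1 : Int) * (((m : Nat) + 1 : Int) - 1) = 2 * r + 2 * m := by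
      rw [show ((m : Nat) + 1 : Int) * (((m : Nat) + 1 : Int) - 1) = (m : Int) * ((m : Int) - 1) + 2 * m by ring, h1]
    push_cast
    push_cast at h2
    have h3 : ((m : Int) + 1) * (n - 1) = (m : Int) * (n - 1) + (n - 1) := by ring
    rw [h3, show ((m : Int) + 1) * ((m : Int) + 1 - 1) = 2 * r + 2 * ↑m from h2, h1]
    omega

lemma conn_loop (n b : Int) (acc : Int) :
    (PySem.List.pyRange 0 (b + 1) 1).foldl (fun a t => a + ((n - 1) - t)) acc
      = acc + max (b + 1) 0 * (n - 1) - (max (b + 1) 0 * (max (b + 1) 0 - 1)) / 2 := by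
  rw [PySem.List.pyRange_one]
  have hc : ((b + 1 - 0).toNat : Int) = max (b + 1) 0 := by omega
  rw [conn_loop_nat n ((b + 1 - 0).toNat) acc, hc]

lemma floordiv_two (a : Int) : PySem.Int.floordiv a 2 = a / 2 := by
  unfold PySem.Int.floordiv
  rw [Int.fdiv_eq_ediv]
  simp

-- ===== VERDICT (by name: the statement is the Claim_ definition above) =====
theorem conn_spec : Claim_equal_conn := by
  intro j k n _
  unfold Spec_conn conn conn_alt
  by_cases hjk : j = k
  · simp [hjk]
  · simp only [if_neg hjk]
    by_cases h : j > k
    · have hlt : ¬ j < k := by omega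
      simp only [if_pos h, if_neg hlt, floordiv_two, conn_loop]
      ring_nf
    · have hlt : j < k := by omega
      simp only [if_neg h, if_pos hlt, floordiv_two, conn_loop]
      ring_nf
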